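-- pv_equiv track=rewrite | github.com/Vineeth0102/MAANG-prep | 1. Arrays and Strings/1.2 Check Permutation/Solution.py | permuation_check
-- ===== SOURCE A (Python) =====
-- def permuation_check(str1,str2):
--
--     lowered_str1 = "".join(str1.lower().split())
--     lowered_str2 = "".join(str2.lower().split())
--
--     if len(lowered_str1) != len(lowered_str2):
--         return False
--     char_map = {}
--     for i in lowered_str1:
--         if i not in char_map:
--             char_map[i] = 1
--         else :
--             char_map[i] += 1
--
--     for i in lowered_str2:
--         if i not in char_map:
--             return False
--         else:
--             char_map[i] -= 1
--
--     is_permuation = all(count==0 for count in char_map.values())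
--     if is_permuation:
--         return True
--     else:
--         return False
-- ===== SOURCE B (Python) =====
-- def permuation_check(str1, str2):
--     lowered_str1 = "".join(str1.lower().split())
--     lowered_str2 = "".join(str2.lower().split())
--     return sorted(lowered_str1) == sorted(lowered_str2)
-- ===== Notes on version B (the rewrite author's own statement) =====
-- stated objective: idiomatic
-- what changed: Replaces A's length guard plus two dict-counting passes and a zero-check with a single sort-and-compare of the two normalized strings.
import Mathlib
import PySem

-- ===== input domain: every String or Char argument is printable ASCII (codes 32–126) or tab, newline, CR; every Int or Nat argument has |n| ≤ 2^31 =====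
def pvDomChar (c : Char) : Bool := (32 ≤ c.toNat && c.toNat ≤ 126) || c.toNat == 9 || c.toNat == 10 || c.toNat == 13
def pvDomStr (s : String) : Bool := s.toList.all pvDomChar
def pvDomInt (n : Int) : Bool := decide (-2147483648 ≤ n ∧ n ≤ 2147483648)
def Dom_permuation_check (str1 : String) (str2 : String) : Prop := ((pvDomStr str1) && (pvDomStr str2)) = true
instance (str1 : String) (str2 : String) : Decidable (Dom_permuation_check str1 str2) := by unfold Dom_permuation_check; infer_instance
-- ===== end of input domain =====

-- B replaces A's two dict-counting passes with a single sort-and-compare of the normalized strings (idiomatic; not faster).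

-- ===== PORT A =====
-- normalization shared verbatim by both Pythons: "".join(s.lower().split())
def pvNorm (s : String) : List Char :=
  PySem.Chars.join [] (PySem.Chars.split₀ (PySem.Chars.lower s.toList))

-- A's second loop: 'return False' on a missing key, else decrement; ported as an Option-valued recursion
def pvSecondLoop (d : PySem.Dict Char Int) : List Char → Option (PySem.Dict Char Int)
  | [] => some d
  | i :: rest =>
      if d.contains i = false then none
      else pvSecondLoop (d.modify i 0 (· - 1)) rest

def permuation_check (str1 : String) (str2 : String) : Bool :=
  let lowered_str1 := pvNorm str1
  let lowered_str2 := pvNorm str2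
  if lowered_str1.length ≠ lowered_str2.length then false
  else
    let char_map := lowered_str1.foldl
      (fun d i => if d.contains i = false then d.insert i 1 else d.modify i 0 (· + 1))
      PySem.Dict.empty
    match pvSecondLoop char_map lowered_str2 with
    | none => false
    | some d => if d.values.all (fun count => count == 0) then true else false

-- ===== PORT B =====
def permuation_check_alt (str1 : String) (str2 : String) : Bool :=
  let lowered_str1 := pvNorm str1
  let lowered_str2 := pvNorm str2
  PySem.List.sorted lowered_str1 (fun x => x) == PySem.List.sorted lowered_str2 (fun x => x)

-- ===== PRECONDITION & SPEC =====
def Spec_permuation_check (str1 : String) (str2 : String) (out : Bool) : Prop := out = permuation_check_alt str1 str2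
instance (str1 : String) (str2 : String) (out : Bool) : Decidable (Spec_permuation_check str1 str2 out) := by unfold Spec_permuation_check; infer_instance

-- ===== CLAIM (what is proved, stated in full; the proofs are below) =====
def Claim_equal_permuation_check : Prop := ∀ (str1 : String) (str2 : String), Dom_permuation_check str1 str2 → Spec_permuation_check str1 str2 (permuation_check str1 str2)

-- ===== LEMMAS AND PROOFS =====

-- A's first loop builds exactly Counter(lowered_str1)
lemma firstLoop_eq_counter (l : List Char) :
    l.foldl (fun d i => if d.contains i = false then d.insert i 1 else d.modify i 0 (· + 1))
      PySem.Dict.empty = PySem.Dict.counter l := by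
  rw [PySem.Dict.counter_eq_foldl]
  apply PySem.List.foldl_congr_mem
  intro d i _
  by_cases h : d.contains i = false
  · simp [h, PySem.Dict.modify, PySem.Dict.getD_of_not_contains d 0 h]
  · simp [h]

lemma keys_foldl_modify_sub (l : List Char) (d : PySem.Dict Char Int)
    (h : ∀ x ∈ l, d.contains x = true) :
    (l.foldl (fun d x => d.modify x 0 (· - 1)) d).keys = d.keys := by
  induction l generalizing d with
  | nil => rfl
  | cons c t ih =>
      simp only [List.foldl_cons]
      rw [ih]
      · rw [PySem.Dict.keys_modify, PySem.Dict.keys_insert_of_contains (h := h c (by simp))]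
      · intro x hx
        rw [PySem.Dict.contains_modify, h x (by simp [hx]), Bool.or_true]

lemma getD_foldl_modify_sub (l : List Char) (d : PySem.Dict Char Int) (c : Char) :
    (l.foldl (fun d x => d.modify x 0 (· - 1)) d).getD c 0 = d.getD c 0 - l.count c := by
  induction l generalizing d with
  | nil => simp
  | cons x t ih =>
      simp only [List.foldl_cons]
      rw [ih, PySem.Dict.getD_modify, List.count_cons]
      by_cases hx : c = x
      · simp [hx]
        omega
      · simp [hx, Ne.symm hx]

lemma secondLoop_some (l : List Char) (d : PySem.Dict Char Int)
    (h : ∀ x ∈ l, d.contains x = true) :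
    pvSecondLoop d l = some (l.foldl (fun d x => d.modify x 0 (· - 1)) d) := by
  induction l generalizing d with
  | nil => rfl
  | cons c t ih =>
      simp only [pvSecondLoop, h c (by simp), List.foldl_cons]
      simp only [Bool.true_eq_false, if_false]
      rw [ih]
      intro x hx
      rw [PySem.Dict.contains_modify, h x (by simp [hx]), Bool.or_true]

lemma secondLoop_none (l : List Char) (d : PySem.Dict Char Int)
    (c : Char) (hc : c ∈ l) (h : d.contains c = false) :
    pvSecondLoop d l = none := by
  induction l generalizing d with
  | nil => cases hc
  | cons a t ih =>
      by_cases ha : d.contains a = false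
      · simp [pvSecondLoop, ha]
      · simp only [pvSecondLoop, ha]
        rcases List.mem_cons.mp hc with rfl | hct
        · exact absurd h ha
        · refine ih _ hct ?_
          rw [PySem.Dict.contains_modify]
          have hca : c ≠ a := by rintro rfl; exact ha h
          simp [hca, h]

-- ===== VERDICT (by name: the statement is the Claim_ definition above) =====
theorem permuation_check_spec : Claim_equal_permuation_check := by
  intro str1 str2 _
  unfold Spec_permuation_check permuation_check permuation_check_alt
  dsimp only
  set l1 := pvNorm str1 with hl1
  set l2 := pvNorm str2 with hl2
  clear_value l1 l2
  rw [firstLoop_eq_counter]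
  have hsorted : (PySem.List.sorted l1 (fun x => x) == PySem.List.sorted l2 (fun x => x))
      = decide (l1.Perm l2) := by
    rcases Bool.eq_false_or_eq_true (decide (l1.Perm l2)) with hp | hp <;>
      simp_all [PySem.List.sorted_id_eq_sorted_id_iff_perm]
  rw [hsorted]
  by_cases hlen : l1.length ≠ l2.length
  · have : ¬ l1.Perm l2 := fun hperm => hlen hperm.length_eq
    simp [hlen, this]
  · simp only [hlen, if_false]
    push Not at hlen
    by_cases hmem : ∀ x ∈ l2, x ∈ l1
    · have hcont : ∀ x ∈ l2, (PySem.Dict.counter l1).contains x = true := by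
        intro x hx
        rw [PySem.Dict.contains_counter]
        exact List.elem_eq_true_of_mem (hmem x hx)
      rw [secondLoop_some _ _ hcont]
      dsimp only
      have hnd : (PySem.Dict.counter l1).keys.Nodup := PySem.Dict.nodup_keys_counter l1
      have hkeys := keys_foldl_modify_sub l2 (PySem.Dict.counter l1) hcont
      have hnd' : (l2.foldl (fun d x => d.modify x 0 (· - 1)) (PySem.Dict.counter l1)).keys.Nodup := by
        rw [hkeys]; exact hnd
      rw [PySem.Dict.values_eq_map_keys _ hnd' 0]
      have hall : (List.map (fun k => (l2.foldl (fun d x => d.modify x 0 (· - 1)) (PySem.Dict.counter l1)).getD k 0)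
            (l2.foldl (fun d x => d.modify x 0 (· - 1)) (PySem.Dict.counter l1)).keys).all (fun count => count == 0)
          = decide (∀ k ∈ l1, l1.count k = l2.count k) := by
        rw [hkeys, PySem.Dict.keys_counter]
        rcases Bool.eq_false_or_eq_true (decide (∀ k ∈ l1, l1.count k = l2.count k)) with h | h <;>
          rw [h]
        · rw [decide_eq_true_eq] at h
          apply List.all_eq_true.mpr
          intro v hv
          obtain ⟨k, hk, rfl⟩ := List.mem_map.mp hv
          rw [PySem.Set.mem_ofList] at hk
          rw [getD_foldl_modify_sub, PySem.Dict.getD_counter]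
          simp only [beq_iff_eq]
          have := h k hk
          omega
        · rw [decide_eq_false_iff_not] at h
          push Not at h
          obtain ⟨k, hk, hne⟩ := h
          apply List.all_eq_false.mpr
          refine ⟨(l2.foldl (fun d x => d.modify x 0 (· - 1)) (PySem.Dict.counter l1)).getD k 0, ?_, ?_⟩
          · exact List.mem_map_of_mem ((PySem.Set.mem_ofList l1 k).mpr hk)
          · rw [getD_foldl_modify_sub, PySem.Dict.getD_counter]
            simp only [beq_iff_eq]
            omega
      rw [hall]
      have hiff : (∀ k ∈ l1, l1.count k = l2.count k) ↔ l1.Perm l2 := by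
        constructor
        · intro h
          rw [List.perm_iff_count]
          intro a
          by_cases ha : a ∈ l1
          · exact h a ha
          · have h2 : a ∉ l2 := fun hx => ha (hmem a hx)
            rw [List.count_eq_zero_of_not_mem ha, List.count_eq_zero_of_not_mem h2]
        · intro h k _
          exact (List.perm_iff_count.mp h) k
      rcases Bool.eq_false_or_eq_true (decide (l1.Perm l2)) with hp | hp <;> simp_all
    · push Not at hmem
      obtain ⟨c, hc, hcl1⟩ := hmem
      have hcont : (PySem.Dict.counter l1).contains c = false := by
        rw [PySem.Dict.contains_counter]
        simpa using hcl1
      rw [secondLoop_none l2 _ c hc hcont]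
      dsimp only
      have : ¬ l1.Perm l2 := fun hperm => hcl1 (hperm.mem_iff.mpr hc)
      simp [this]
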